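-- pv_equiv track=rewrite | github.com/XzStark/Social-Simulation | people/web_search_context.py | _format_hits
-- ===== SOURCE A (Python) =====
-- def _format_hits(hits: list[dict[str, str]], max_chars: int) -> str:
--     if max_chars <= 0 or not hits:
--         return ""
--     parts: list[str] = []
--     n = 0
--     for h in hits:
--         title = (h.get("title") or "").strip()
--         url = (h.get("url") or "").strip()
--         body = (h.get("body") or "").strip()[:400]
--         line = f"· {title}\n  {url}\n  {body}\n"
--         if n + len(line) > max_chars:
--             break
--         parts.append(line)
--         n += len(line)
--     return "\n".join(parts).strip()
-- ===== SOURCE B (Python) =====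
-- def _line(h: dict[str, str]) -> str:
--     title = (h.get("title") or "").strip()
--     url = (h.get("url") or "").strip()
--     body = (h.get("body") or "").strip()[:400]
--     return f"· {title}\n  {url}\n  {body}\n"
--
--
-- def _accum(n: int, xs: list[int]) -> list[int]:
--     if not xs:
--         return []
--     m = n + xs[0]
--     return [m] + _accum(m, xs[1:])
--
--
-- def _format_hits(hits: list[dict[str, str]], max_chars: int) -> str:
--     if max_chars <= 0 or not hits:
--         return ""
--     lines = [_line(h) for h in hits]
--     cums = _accum(0, [len(l) for l in lines])
--     kept = [l for c, l in zip(cums, lines) if c <= max_chars]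
--     return "\n".join(kept).strip()
-- ===== Notes on version B (the rewrite author's own statement) =====
-- stated objective: alternative
-- what changed: Replaces A's single stateful loop with break (mutable running total, append, early exit) by a two-phase data-flow pipeline: map all hits to lines, compute the cumulative-length list, and keep by filtering pairs whose cumulative total fits the budget (correct because line lengths are strictly positive, so cumulative sums are strictly increasing and filter equals stop-at-first-overflow).
import Mathlib
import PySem

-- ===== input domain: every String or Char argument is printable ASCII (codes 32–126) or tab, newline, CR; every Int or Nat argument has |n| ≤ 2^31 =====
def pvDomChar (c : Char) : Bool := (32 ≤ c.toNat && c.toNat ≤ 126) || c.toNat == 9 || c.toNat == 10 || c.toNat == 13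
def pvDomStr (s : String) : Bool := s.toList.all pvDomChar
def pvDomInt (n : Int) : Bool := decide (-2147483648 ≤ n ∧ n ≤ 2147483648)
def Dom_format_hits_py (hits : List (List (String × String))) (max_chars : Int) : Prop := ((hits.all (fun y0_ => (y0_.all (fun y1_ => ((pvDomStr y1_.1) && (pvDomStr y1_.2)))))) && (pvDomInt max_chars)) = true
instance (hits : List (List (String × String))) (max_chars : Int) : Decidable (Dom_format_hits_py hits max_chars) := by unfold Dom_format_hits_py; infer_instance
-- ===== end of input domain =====

-- B rebuilds A's stateful break-loop as a map / cumulative-sum / filter pipeline (alternative decomposition, same cost).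


-- ===== PORT A =====
-- h.get(k) on the association list: first match; `or ""` maps both a missing key and "" to ""
def pvLookup (h : List (String × String)) (k : String) : String :=
  (((h.find? (fun p => p.1 == k)).map (·.2)).getD "")

-- the f-string  f"· {title}\n  {url}\n  {body}\n"  (shared by both Pythons verbatim)
def pvLine (h : List (String × String)) : String :=
  let title := PySem.Str.strip (pvLookup h "title")
  let url := PySem.Str.strip (pvLookup h "url")
  let body := PySem.Str.slice (PySem.Str.strip (pvLookup h "body")) none (some 400)
  "· " ++ title ++ "\n  " ++ url ++ "\n  " ++ body ++ "\n"

-- A's for-loop with its running total n and break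
def pvLoopA (max_chars : Int) : List (List (String × String)) → List String → Int → List String
  | [], parts, _ => parts
  | h :: rest, parts, n =>
    let line := pvLine h
    if n + (PySem.Str.len line : Int) > max_chars then parts
    else pvLoopA max_chars rest (parts ++ [line]) (n + (PySem.Str.len line : Int))

def format_hits_py (hits : List (List (String × String))) (max_chars : Int) : String :=
  if max_chars ≤ 0 ∨ hits = [] then ""
  else PySem.Str.strip (PySem.Str.join "\n" (pvLoopA max_chars hits [] 0))

-- ===== PORT B =====
-- B's recursive _accum helper: running cumulative sums starting from n
def pvAccum (n : Int) : List Int → List Int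
  | [] => []
  | x :: xs => (n + x) :: pvAccum (n + x) xs

def format_hits_py_alt (hits : List (List (String × String))) (max_chars : Int) : String :=
  if max_chars ≤ 0 ∨ hits = [] then ""
  else
    let lines := hits.map pvLine
    let cums := pvAccum 0 (lines.map (fun l => (PySem.Str.len l : Int)))
    let kept := ((cums.zip lines).filter (fun p => p.1 ≤ max_chars)).map (·.2)
    PySem.Str.strip (PySem.Str.join "\n" kept)

-- ===== PRECONDITION & SPEC =====
def Spec_format_hits_py (hits : List (List (String × String))) (max_chars : Int) (out : String) : Prop := out = format_hits_py_alt hits max_chars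
instance (hits : List (List (String × String))) (max_chars : Int) (out : String) : Decidable (Spec_format_hits_py hits max_chars out) := by unfold Spec_format_hits_py; infer_instance

-- ===== CLAIM (what is proved, stated in full; the proofs are below) =====
def Claim_equal_format_hits_py : Prop := ∀ (hits : List (List (String × String))) (max_chars : Int), Dom_format_hits_py hits max_chars → Spec_format_hits_py hits max_chars (format_hits_py hits max_chars)

-- ===== LEMMAS AND PROOFS =====

-- every formatted line is nonempty, so its length is strictly positive
lemma pvLine_len_pos (h : List (String × String)) : 0 < (PySem.Str.len (pvLine h) : Int) := by
  simp [pvLine, PySem.Str.len_eq]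
  omega

lemma pvLine_len_pos_of_mem {y : String} {rest : List (List (String × String))}
    (hy : y ∈ rest.map pvLine) : 0 < (PySem.Str.len y : Int) := by
  obtain ⟨z, _, rfl⟩ := List.mem_map.mp hy
  exact pvLine_len_pos z

-- every cumulative sum of strictly positive summands exceeds the start value
lemma pvAccum_gt (xs : List Int) (hpos : ∀ x ∈ xs, 0 < x) :
    ∀ n c, c ∈ pvAccum n xs → n < c := by
  induction xs with
  | nil => intro n c hc; simp [pvAccum] at hc
  | cons x xs ih =>
    intro n c hc
    simp only [pvAccum, List.mem_cons] at hc
    rcases hc with h | h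
    · have := hpos x (by simp); omega
    · have := ih (fun y hy => hpos y (by simp [hy])) (n + x) c h
      have := hpos x (by simp); omega

-- A's break-loop equals B's filter over cumulative sums, for any start state
lemma loop_eq_filter (max_chars : Int) (hs : List (List (String × String)))
    (parts : List String) (n : Int) :
    pvLoopA max_chars hs parts n =
      parts ++ (((pvAccum n ((hs.map pvLine).map (fun l => (PySem.Str.len l : Int)))).zip
        (hs.map pvLine)).filter (fun p => p.1 ≤ max_chars)).map (·.2) := by
  induction hs generalizing parts n with
  | nil => simp [pvLoopA, pvAccum]
  | cons h rest ih =>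
    rw [pvLoopA]
    simp only [List.map_cons, pvAccum, List.zip_cons_cons, List.filter_cons]
    have hline := pvLine_len_pos h
    have hpos : ∀ x ∈ (rest.map pvLine).map (fun l => (PySem.Str.len l : Int)), 0 < x := by
      intro x hx
      obtain ⟨y, hy, rfl⟩ := List.mem_map.mp hx
      exact pvLine_len_pos_of_mem hy
    generalize hL : (PySem.Str.len (pvLine h) : Int) = L at *
    by_cases hb : n + L > max_chars
    · rw [if_pos hb]
      have hfail : (decide (((n + L, pvLine h) : Int × String).1 ≤ max_chars)) = false := by
        simp only [decide_eq_false_iff_not]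
        show ¬ (n + L ≤ max_chars)
        omega
      rw [hfail]
      simp only [Bool.false_eq_true, if_false]
      -- every later cumulative sum also overflows, so the filter keeps nothing
      have hnil : (((pvAccum (n + L) ((rest.map pvLine).map (fun l => (PySem.Str.len l : Int)))).zip
          (rest.map pvLine)).filter (fun p => decide (p.1 ≤ max_chars))) = [] := by
        apply List.filter_eq_nil_iff.mpr
        intro p hp
        have h1 := (List.of_mem_zip hp).1
        have hgt := pvAccum_gt _ hpos (n + L) p.1 h1
        simp only [decide_eq_true_eq]
        omega
      rw [hnil]
      simp only [List.map_nil, List.append_nil]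
    · rw [if_neg hb]
      have hok : (decide (((n + L, pvLine h) : Int × String).1 ≤ max_chars)) = true := by
        simp only [decide_eq_true_eq]
        show n + L ≤ max_chars
        omega
      rw [hok]
      simp only [if_true, ih]
      simp

-- ===== VERDICT (by name: the statement is the Claim_ definition above) =====
theorem format_hits_py_spec : Claim_equal_format_hits_py := by
  intro hits max_chars _
  unfold Spec_format_hits_py format_hits_py format_hits_py_alt
  by_cases hg : max_chars ≤ 0 ∨ hits = []
  · rw [if_pos hg, if_pos hg]
  · rw [if_neg hg, if_neg hg, loop_eq_filter]
    rw [List.nil_append]
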